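-- pv_equiv track=rewrite | github.com/jakobkhansen/KattisSolutions | recount/recount.py | recount
-- ===== SOURCE A (Python) =====
-- def recount(lines):
--     votes = {}
--     for line in lines[:-1]:
--         name = line.strip()
--         votes[name] = votes.get(name, 0) + 1
--
--     votes_sorted = sorted(votes.items(), key=lambda x: x[1])
--     if votes_sorted[-1][1] == votes_sorted[-2][1]:
--         return "Runoff!"
--
--     return votes_sorted[-1][0]
-- ===== SOURCE B (Python) =====
-- def recount(lines):
--     names = [line.strip() for line in lines[:-1]]
--     candidates = []
--     for n in names:
--         if n not in candidates:
--             candidates.append(n)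
--     counts = [names.count(c) for c in candidates]
--     top = max(counts)
--     if counts.count(top) > 1:
--         return "Runoff!"
--     return candidates[counts.index(top)]
-- ===== Notes on version B (the rewrite author's own statement) =====
-- stated objective: alternative
-- what changed: B drops A's dict tally and the sort by count: it dedups the stripped names into an ordered candidate list, computes each candidate's tally with list.count, and decides with max/count/index over the parallel counts list.
import Mathlib
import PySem

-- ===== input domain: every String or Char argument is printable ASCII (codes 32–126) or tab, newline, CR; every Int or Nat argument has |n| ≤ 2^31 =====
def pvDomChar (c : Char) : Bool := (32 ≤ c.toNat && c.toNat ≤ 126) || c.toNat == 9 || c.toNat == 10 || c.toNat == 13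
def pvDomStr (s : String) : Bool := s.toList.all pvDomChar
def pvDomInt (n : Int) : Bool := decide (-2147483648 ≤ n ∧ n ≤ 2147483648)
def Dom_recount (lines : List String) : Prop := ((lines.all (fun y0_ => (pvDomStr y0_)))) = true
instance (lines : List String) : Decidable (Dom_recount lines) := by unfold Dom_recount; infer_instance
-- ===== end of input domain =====

-- B replaces A's dict tally + sort by count with an ordered dedup of the names,
-- a per-candidate list.count tally, and max/count/index over the counts list (no dict, no sort).
-- ===== PORT A =====
def recount (lines : List String) : String :=
  let votes := (PySem.List.slice lines none (some (-1))).foldl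
    (fun d line =>
      let name := PySem.Str.strip line
      d.insert name (d.getD name 0 + 1)) (PySem.Dict.empty : PySem.Dict String Int)
  let votes_sorted := PySem.List.sorted votes.items (fun x => x.2) false
  match PySem.List.pyGet? votes_sorted (-1), PySem.List.pyGet? votes_sorted (-2) with
  | some a, some b => if a.2 == b.2 then "Runoff!" else a.1
  | _, _ => ""  -- IndexError in Python (fewer than two candidates): outside Pre_

-- ===== PORT B =====
def recount_alt (lines : List String) : String :=
  let names := (PySem.List.slice lines none (some (-1))).map (fun line => PySem.Str.strip line)
  let candidates := names.foldl
    (fun acc n => if !(acc.contains n) then acc ++ [n] else acc) ([] : List String)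
  let counts := candidates.map (fun c => (PySem.List.count names c : Int))
  match PySem.List.max? counts (fun c => c) with
  | some top =>
      if (1 : Int) < (PySem.List.count counts top : Int) then "Runoff!"
      else
        match PySem.List.index? counts top with
        | some i => (PySem.List.pyGet? candidates (i : Int)).getD ""
        | none => ""  -- unreachable: top is an element of counts
  | none => ""  -- ValueError in Python (max of an empty list, no candidates): outside Pre_

-- ===== PRECONDITION & SPEC =====
-- A raises IndexError when lines[:-1] holds fewer than two distinct stripped names; exactly those inputs are excluded.
def Pre_recount (lines : List String) : Prop :=
  2 ≤ (PySem.Set.ofList (lines.dropLast.map (fun l => PySem.Str.strip l))).length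
instance (lines : List String) : Decidable (Pre_recount lines) := by unfold Pre_recount; infer_instance
def pvWitness_recount : List String := ["a", "b", ""]

def Spec_recount (lines : List String) (out : String) : Prop := out = recount_alt lines
instance (lines : List String) (out : String) : Decidable (Spec_recount lines out) := by unfold Spec_recount; infer_instance

-- ===== CLAIM (what is proved, stated in full; the proofs are below) =====
def Claim_equal_recount : Prop := ∀ (lines : List String), Dom_recount lines → Pre_recount lines → Spec_recount lines (recount lines)

-- ===== LEMMAS AND PROOFS =====

-- A's tallying loop is Counter(stripped names)
lemma votes_eq (lines : List String) :
    (PySem.List.slice lines none (some (-1))).foldl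
      (fun d line => d.insert (PySem.Str.strip line)
        (d.getD (PySem.Str.strip line) 0 + 1)) PySem.Dict.empty
    = PySem.Dict.counter (lines.dropLast.map (fun l => PySem.Str.strip l)) := by
  rw [PySem.List.slice_to_neg_one, ← PySem.Dict.foldl_insert_getD_add_one_eq_counter,
      List.foldl_map]

-- B's dedup loop is set(names) in first-occurrence order
lemma cand_eq (names : List String) :
    names.foldl (fun acc n => if !(acc.contains n) then acc ++ [n] else acc) []
    = PySem.Set.ofList names := by
  rw [PySem.Set.ofList_eq_foldl]
  have hf : (fun (acc : List String) n => if !(acc.contains n) then acc ++ [n] else acc)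
      = PySem.Set.add := by
    funext acc n
    cases h : acc.contains n <;> simp [PySem.Set.add, PySem.Set.contains, h] <;> simp_all
  rw [hf]

-- a list of length ≥ 2 splits off its last two elements
lemma split_last_two {α : Type} (L : List α) (h : 2 ≤ L.length) :
    L = L.take (L.length - 2) ++
        [L[L.length - 2]'(by omega), L[L.length - 1]'(by omega)] := by
  conv_lhs => rw [← List.take_append_drop (L.length - 2) L]
  congr 1
  rw [List.drop_eq_getElem_cons (by omega), List.drop_eq_getElem_cons (by omega)]
  have h1 : L.length - 2 + 1 + 1 = L.length := by omega
  have h2 : L.length - 2 + 1 = L.length - 1 := by omega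
  rw [h1, List.drop_length]
  simp only [h2]

-- last-two of the count-sorted pair list vs max/count/index over the counts column
lemma core (xs : List (String × Int)) (h2 : 2 ≤ xs.length) :
    (match PySem.List.pyGet? (PySem.List.sorted xs (fun x => x.2) false) (-1),
           PySem.List.pyGet? (PySem.List.sorted xs (fun x => x.2) false) (-2) with
     | some a, some b => if a.2 == b.2 then "Runoff!" else a.1
     | _, _ => "")
    = (match PySem.List.max? (xs.map (fun p => p.2)) (fun c => c) with
       | some top =>
          if (1 : Int) < (PySem.List.count (xs.map (fun p => p.2)) top : Int) then "Runoff!"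
          else
            match PySem.List.index? (xs.map (fun p => p.2)) top with
            | some i => (PySem.List.pyGet? (xs.map (fun p => p.1)) (i : Int)).getD ""
            | none => ""
       | none => "") := by
  set L := PySem.List.sorted xs (fun x => x.2) false with hL
  have hlen : L.length = xs.length := PySem.List.length_sorted ..
  have hL2 : 2 ≤ L.length := by omega
  have hperm : L.Perm xs := PySem.List.sorted_perm ..
  have hpw : L.Pairwise (fun x y => x.2 ≤ y.2) := PySem.List.sorted_pairwise ..
  obtain ⟨F, s, t, hFst⟩ : ∃ F s t, L = F ++ [s, t] :=
    ⟨_, _, _, split_last_two L hL2⟩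
  have hg1 : PySem.List.pyGet? L (-1) = some t := by
    rw [hFst, show F ++ [s, t] = (F ++ [s]) ++ [t] by simp,
        PySem.List.pyGet?_neg_one_append_singleton]
  have hg2 : PySem.List.pyGet? L (-2) = some s := by
    rw [hFst, PySem.List.pyGet?_neg_ofNat _ 2 (by omega) (by simp)]
    simp
  rcases List.pairwise_append.1 (hFst ▸ hpw) with ⟨-, hlast, hcross⟩
  have hfront : ∀ y ∈ F, y.2 ≤ s.2 := fun y hy => hcross y hy s (by simp)
  have hst : s.2 ≤ t.2 := List.rel_of_pairwise_cons hlast (by simp)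
  have hmaxt : ∀ y ∈ xs, y.2 ≤ t.2 := by
    intro y hy
    have hyL : y ∈ F ++ [s, t] := (hFst ▸ hperm).mem_iff.2 hy
    rcases List.mem_append.1 hyL with h | h
    · exact le_trans (hfront y h) hst
    · rcases List.mem_cons.1 h with rfl | h
      · exact hst
      · simp at h; exact h ▸ le_refl _
  have htmem : t ∈ xs := (hFst ▸ hperm).mem_iff.1 (by simp)
  -- the max of the counts column is t.2
  have hcne : xs.map (fun p => p.2) ≠ [] := by
    intro h
    rw [List.map_eq_nil_iff] at h
    rw [h] at h2
    simp at h2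
  obtain ⟨top, htop⟩ : ∃ top, PySem.List.max? (xs.map (fun p => p.2)) (fun c => c) = some top := by
    cases hq : PySem.List.max? (xs.map (fun p => p.2)) (fun c => c) with
    | none => exact absurd ((PySem.List.max?_eq_none_iff _ _).1 hq) hcne
    | some m => exact ⟨m, rfl⟩
  have htopmem : top ∈ xs.map (fun p => p.2) := PySem.List.max?_mem htop
  have htopmax : ∀ y ∈ xs.map (fun p => p.2), y ≤ top := PySem.List.max?_isMax htop
  have htopt : top = t.2 := by
    obtain ⟨x, hx, hxe⟩ := List.mem_map.1 htopmem
    exact le_antisymm (hxe ▸ hmaxt x hx) (htopmax t.2 (List.mem_map.2 ⟨t, htmem, rfl⟩))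
  -- the count of top in the counts column is countP on xs
  have hcount : (PySem.List.count (xs.map (fun p => p.2)) top : Int)
      = (xs.countP (fun p => p.2 == top) : Int) := by
    rw [PySem.List.count_eq, List.count_eq_countP, List.countP_map]
    rfl
  have hperm' : (F ++ [s, t]).Perm xs := hFst ▸ hperm
  have hcnt_split : xs.countP (fun p => p.2 == top)
      = F.countP (fun p => p.2 == top)
        + ((if s.2 == top then 1 else 0) + (if t.2 == top then 1 else 0)) := by
    rw [← hperm'.countP_eq, List.countP_append]
    simp [List.countP_cons]
    exact Nat.add_comm _ _
  rw [hg1, hg2, htop]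
  dsimp only
  rw [hcount]
  by_cases hEq : t.2 = s.2
  · -- tie at the top: both sides return "Runoff!"
    have hts : (t.2 == s.2) = true := by simp [hEq]
    have h2c : 2 ≤ xs.countP (fun p => p.2 == top) := by
      rw [hcnt_split, if_pos (by simp [hEq, htopt]), if_pos (by simp [htopt])]
      omega
    rw [if_pos hts, if_pos (by exact_mod_cast h2c)]
  · -- unique max: A returns the sorted last name, B indexes the unique top count
    have hts : ¬ ((t.2 == s.2) = true) := by simpa using hEq
    have hslt : s.2 < t.2 := lt_of_le_of_ne hst (fun h => hEq h.symm)
    have hfz : F.countP (fun p => p.2 == top) = 0 := by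
      rw [List.countP_eq_zero]
      intro y hy
      simp only [beq_iff_eq, htopt]
      have := hfront y hy
      omega
    have hcnt1 : xs.countP (fun p => p.2 == top) = 1 := by
      rw [hcnt_split, hfz, if_neg (by simp [htopt]; omega), if_pos (by simp [htopt])]
    rw [if_neg hts, if_neg (by rw [hcnt1]; simp)]
    -- the unique element whose count is top is t
    have hflen : (xs.filter (fun p => p.2 == top)).length = 1 := by
      rw [← List.countP_eq_length_filter]; exact hcnt1
    obtain ⟨z, hz⟩ := List.length_eq_one_iff.1 hflen
    have htF : t ∈ xs.filter (fun p => p.2 == top) :=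
      List.mem_filter.2 ⟨htmem, by simp [htopt]⟩
    obtain ⟨i, hidx⟩ : ∃ i, PySem.List.index? (xs.map (fun p => p.2)) top = some i := by
      cases hq : PySem.List.index? (xs.map (fun p => p.2)) top with
      | none => exact absurd ((PySem.List.index?_eq_none_iff ..).1 hq) (by simp [htopmem])
      | some i => exact ⟨i, rfl⟩
    obtain ⟨hilt, hie, -⟩ := PySem.List.getElem_of_index?_eq_some hidx
    have hilt' : i < xs.length := by simpa using hilt
    have hxiF : xs[i] ∈ xs.filter (fun p => p.2 == top) := by
      refine List.mem_filter.2 ⟨List.getElem_mem _, ?_⟩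
      have : (xs.map (fun p => p.2))[i] = xs[i].2 := by simp
      simp [← hie, this]
    have hxit : xs[i] = t := by
      rw [hz] at hxiF htF
      simp at hxiF htF
      rw [hxiF, htF]
    rw [hidx]
    dsimp only
    rw [PySem.List.pyGet?_natCast]
    have : (xs.map (fun p => p.1))[i]? = some t.1 := by
      rw [List.getElem?_eq_getElem (by simpa using hilt')]
      simp [hxit]
    simp [this]

-- ===== VERDICT (by name: the statement is the Claim_ definition above) =====
theorem recount_spec : Claim_equal_recount := by
  intro lines _ hpre
  unfold Spec_recount
  simp only [recount, recount_alt]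
  rw [votes_eq, PySem.List.slice_to_neg_one, cand_eq]
  have h2 : 2 ≤ (PySem.Dict.counter (lines.dropLast.map (fun l => PySem.Str.strip l))).items.length := by
    rw [PySem.Dict.items_counter, List.length_map]
    exact hpre
  have e2 : (PySem.Set.ofList (lines.dropLast.map (fun l => PySem.Str.strip l))).map
        (fun c => (PySem.List.count (lines.dropLast.map (fun l => PySem.Str.strip l)) c : Int))
      = (PySem.Dict.counter (lines.dropLast.map (fun l => PySem.Str.strip l))).items.map
        (fun p => p.2) := by
    rw [PySem.Dict.items_counter, List.map_map]
    simp [PySem.List.count_eq, Function.comp]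
  have e1 : PySem.Set.ofList (lines.dropLast.map (fun l => PySem.Str.strip l))
      = (PySem.Dict.counter (lines.dropLast.map (fun l => PySem.Str.strip l))).items.map
        (fun p => p.1) := by
    rw [PySem.Dict.items_counter, List.map_map]
    exact (List.map_id' _).symm
  rw [e2, e1]
  exact core (PySem.Dict.counter (lines.dropLast.map (fun l => PySem.Str.strip l))).items h2
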